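-- pv_equiv track=rewrite | github.com/shiva2321/Youtube_Shorts_Generator | auto_important_clips.py | _is_engaging_sentence
-- ===== SOURCE A (Python) =====
-- def _is_engaging_sentence(sentence: str) -> bool:
--   """Heuristic to detect engaging/punchline-worthy sentences."""
--   if not sentence or len(sentence) < 5:
--     return False
--
--   # Check for engagement markers
--   engagement_words = [
--     'wow', 'crazy', 'amazing', 'insane', 'incredible', 'unbelievable',
--     'what', 'how', 'why', 'never', 'always', 'must', 'don\'t', 'can\'t',
--     'wait', 'watch', 'look', 'see', 'hear', 'remember', 'think', 'know',
--     'best', 'worst', 'better', 'worse', 'great', 'terrible', 'awesome',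
--     'epic', 'legendary', 'insane', 'shocked', 'surprised', 'shocked',
--     'laugh', 'joke', 'funny', 'hilarious', 'ridiculous', 'absurd'
--   ]
--
--   sentence_lower = sentence.lower()
--   engagement_score = sum(1 for word in engagement_words if f' {word} ' in f' {sentence_lower} ')
--
--   # Exclamation marks and questions are good indicators
--   if '!' in sentence or ('?' in sentence and len(sentence) < 50):
--     engagement_score += 2
--
--   return engagement_score > 0
-- ===== SOURCE B (Python) =====
-- ENGAGEMENT_WORDS = frozenset(
--     "wow crazy amazing insane incredible unbelievable what how why never "
--     "always must don't can't wait watch look see hear remember think know "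
--     "best worst better worse great terrible awesome epic legendary shocked "
--     "surprised laugh joke funny hilarious ridiculous absurd".split()
-- )
--
--
-- def _is_engaging_sentence(sentence: str) -> bool:
--     if not sentence or len(sentence) < 5:
--         return False
--     has_word = False
--     has_bang = False
--     has_question = False
--     token = []
--     for ch in sentence:
--         if ch == '!':
--             has_bang = True
--         elif ch == '?':
--             has_question = True
--         if ch == ' ':
--             if ''.join(token) in ENGAGEMENT_WORDS:
--                 has_word = True
--             token = []
--         else:
--             token.append(ch.lower())
--     if ''.join(token) in ENGAGEMENT_WORDS:
--         has_word = True
--     return has_word or has_bang or (has_question and len(sentence) < 50)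
-- ===== Notes on version B (the rewrite author's own statement) =====
-- stated objective: alternative
-- what changed: B makes a single streaming pass over the characters, building each lowercased space-delimited token incrementally and testing it against a frozenset at every token boundary while tracking the exclamation and question-mark flags in the same pass, instead of A's 39 separate padded-substring scans of the whole string plus two extra punctuation scans.
import Mathlib
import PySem

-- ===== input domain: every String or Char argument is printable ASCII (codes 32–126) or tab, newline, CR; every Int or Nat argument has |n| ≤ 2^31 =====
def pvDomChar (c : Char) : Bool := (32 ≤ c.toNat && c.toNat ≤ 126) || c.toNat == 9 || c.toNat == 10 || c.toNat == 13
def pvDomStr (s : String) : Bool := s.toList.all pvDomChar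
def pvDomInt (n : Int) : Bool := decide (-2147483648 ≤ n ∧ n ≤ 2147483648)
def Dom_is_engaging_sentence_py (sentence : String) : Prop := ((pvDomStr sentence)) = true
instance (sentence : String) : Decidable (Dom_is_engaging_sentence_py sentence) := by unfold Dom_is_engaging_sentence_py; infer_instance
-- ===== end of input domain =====

-- B replaces A's 39 padded-substring scans (plus separate '!'/'?' scans) by ONE streaming
-- pass that builds each lowercased space-delimited token and tests it against a frozenset
-- at every token boundary, tracking the punctuation flags in the same pass (return value only).

-- ===== PORT A =====
-- A's engagement_words list, in order, duplicates kept
def pvWordsA : List (List Char) :=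
  ["wow".toList, "crazy".toList, "amazing".toList, "insane".toList, "incredible".toList, "unbelievable".toList,
   "what".toList, "how".toList, "why".toList, "never".toList, "always".toList, "must".toList, "don't".toList, "can't".toList,
   "wait".toList, "watch".toList, "look".toList, "see".toList, "hear".toList, "remember".toList, "think".toList, "know".toList,
   "best".toList, "worst".toList, "better".toList, "worse".toList, "great".toList, "terrible".toList, "awesome".toList,
   "epic".toList, "legendary".toList, "insane".toList, "shocked".toList, "surprised".toList, "shocked".toList,
   "laugh".toList, "joke".toList, "funny".toList, "hilarious".toList, "ridiculous".toList, "absurd".toList]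

def is_engaging_sentence_py (sentence : String) : Bool :=
  let cs := sentence.toList
  if cs.isEmpty || cs.length < 5 then false
  else
    let sl := PySem.Chars.lower cs
    -- sum(1 for word in engagement_words if f' {word} ' in f' {sentence_lower} ')
    let score1 : Int := (pvWordsA.countP (fun w => PySem.Chars.isIn (' ' :: (w ++ [' '])) (' ' :: (sl ++ [' '])))  : Nat)
    let score2 : Int := if PySem.Chars.isIn ['!'] cs || (PySem.Chars.isIn ['?'] cs && cs.length < 50) then score1 + 2 else score1
    decide (score2 > 0)

-- ===== PORT B =====
-- B's module-level frozenset, built by splitting one space-separated string literal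
def pvEngagementSet : PySem.Set (List Char) :=
  PySem.Set.ofList (PySem.Chars.split₀
    ("wow crazy amazing insane incredible unbelievable what how why never " ++
     "always must don't can't wait watch look see hear remember think know " ++
     "best worst better worse great terrible awesome epic legendary shocked " ++
     "surprised laugh joke funny hilarious ridiculous absurd").toList)

-- the streaming loop of B: current token is kept reversed; flags as in Source B
def pvScanB : List Char → List Char → Bool → Bool → Bool → Bool × Bool × Bool
  | [], tok, hw, hb, hq => (hw || pvEngagementSet.contains tok.reverse, hb, hq)
  | c :: rest, tok, hw, hb, hq =>
      let hb' := if c == '!' then true else hb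
      let hq' := if c == '!' then hq else if c == '?' then true else hq
      if c == ' ' then
        pvScanB rest [] (hw || pvEngagementSet.contains tok.reverse) hb' hq'
      else
        pvScanB rest (PySem.Chars.lowerChar c :: tok) hw hb' hq'

def is_engaging_sentence_py_alt (sentence : String) : Bool :=
  let cs := sentence.toList
  if cs.isEmpty || cs.length < 5 then false
  else
    let r := pvScanB cs [] false false false
    r.1 || r.2.1 || (r.2.2 && cs.length < 50)

-- ===== PRECONDITION & SPEC =====
def Spec_is_engaging_sentence_py (sentence : String) (out : Bool) : Prop := out = is_engaging_sentence_py_alt sentence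
instance (sentence : String) (out : Bool) : Decidable (Spec_is_engaging_sentence_py sentence out) := by unfold Spec_is_engaging_sentence_py; infer_instance

-- ===== CLAIM (what is proved, stated in full; the proofs are below) =====
def Claim_equal_is_engaging_sentence_py : Prop := ∀ (sentence : String), Dom_is_engaging_sentence_py sentence → Spec_is_engaging_sentence_py sentence (is_engaging_sentence_py sentence)

-- ===== LEMMAS AND PROOFS =====

-- reference single-space split, structural (proof-only helper)
def pvSplitSp : List Char → List (List Char)
  | [] => [[]]
  | c :: rest => if c = ' ' then [] :: pvSplitSp rest else (pvSplitSp rest).modifyHead (c :: ·)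

theorem pvPrefix_firstTok (l : List Char) : ∀ (w : List Char), ' ' ∉ w →
    ((w ++ [' ']) <+: (l ++ [' ']) ↔ w = l.takeWhile (· ≠ ' ')) := by
  induction l with
  | nil =>
    intro w hw
    cases w with
    | nil => simp
    | cons a w' =>
      simp only [List.nil_append, List.cons_append, List.cons_prefix_cons, List.takeWhile_nil]
      constructor
      · rintro ⟨rfl, h⟩; exact absurd (List.mem_cons_self) hw
      · intro h; simp at h
  | cons c rest ih =>
    intro w hw
    cases w with
    | nil =>
      simp only [List.nil_append, List.cons_append, List.cons_prefix_cons, List.takeWhile_cons]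
      by_cases hc : c = ' '
      · simp [hc]
      · simp [hc, Ne.symm hc]
    | cons a w' =>
      have ha : a ≠ ' ' := fun h => hw (h ▸ List.mem_cons_self)
      have hw' : ' ' ∉ w' := fun h => hw (List.mem_cons_of_mem _ h)
      simp only [List.cons_append, List.cons_prefix_cons, List.takeWhile_cons]
      by_cases hac : a = c
      · subst hac
        simp [ha, ih w' hw']
      · constructor
        · rintro ⟨rfl, -⟩; exact absurd rfl hac
        · intro h
          by_cases hc : c = ' '
          · simp [hc] at h
          · simp [hc] at h; exact absurd h.1 hac

theorem pvInfix_skip (a : List Char) : ∀ (b v : List Char), ' ' ∉ a →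
    ((' ' :: v) <:+: (a ++ b) ↔ (' ' :: v) <:+: b) := by
  induction a with
  | nil => intro b v _; simp
  | cons c a' ih =>
    intro b v ha
    have hc : c ≠ ' ' := fun h => ha (h ▸ List.mem_cons_self)
    have ha' : ' ' ∉ a' := fun h => ha (List.mem_cons_of_mem _ h)
    rw [List.cons_append, List.infix_cons_iff]
    constructor
    · rintro (hp | hi)
      · rw [List.cons_prefix_cons] at hp
        exact absurd hp.1.symm hc
      · exact (ih b v ha').mp hi
    · intro h; exact Or.inr ((ih b v ha').mpr h)

theorem pvSplitSp_firstTok (l : List Char) :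
    pvSplitSp l = l.takeWhile (· ≠ ' ') ::
      (match l.dropWhile (· ≠ ' ') with | [] => [] | _ :: t => pvSplitSp t) := by
  induction l with
  | nil => simp [pvSplitSp]
  | cons c rest ih =>
    by_cases hc : c = ' '
    · simp [pvSplitSp, hc]
    · simp only [pvSplitSp, if_neg hc, List.takeWhile_cons, List.dropWhile_cons]
      simp only [show (decide (c ≠ ' ')) = true from by simp [hc], if_pos]
      rw [ih]
      simp

theorem pvDropHead {p : Char → Bool} (l : List Char) : ∀ c t, l.dropWhile p = c :: t → p c = false := by
  induction l with
  | nil => intro c t h; simp at h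
  | cons x xs ih =>
    intro c t h
    rw [List.dropWhile_cons] at h
    by_cases hx : p x = true
    · simp [hx] at h; exact ih c t h
    · simp [hx] at h; rw [← h.1]; simpa using hx

theorem pvMain (n : Nat) : ∀ (l w : List Char), l.length ≤ n → w ≠ [] → ' ' ∉ w →
    (PySem.Chars.isIn (' ' :: (w ++ [' '])) (' ' :: (l ++ [' '])) = true ↔ w ∈ pvSplitSp l) := by
  induction n with
  | zero =>
    intro l w hl hw hsp
    have : l = [] := List.eq_nil_of_length_eq_zero (Nat.le_zero.mp hl)
    subst this
    rw [PySem.Chars.isIn_iff_infix]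
    constructor
    · intro h
      have := h.sublist.length_le
      simp at this
      exact absurd this hw
    · intro h
      simp [pvSplitSp] at h
      exact absurd h hw
  | succ n ih =>
    intro l w hl hw hsp
    have htk : ' ' ∉ l.takeWhile (· ≠ ' ') := by
      intro h
      have := List.mem_takeWhile_imp h
      simp at this
    rw [PySem.Chars.isIn_iff_infix, List.infix_cons_iff]
    have hpre : ((' ' :: (w ++ [' '])) <+: (' ' :: (l ++ [' ']))) ↔ w = l.takeWhile (· ≠ ' ') := by
      rw [List.cons_prefix_cons]
      simp only [true_and]
      exact pvPrefix_firstTok l w hsp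
    have hdec : l ++ [' '] = l.takeWhile (· ≠ ' ') ++ (l.dropWhile (· ≠ ' ') ++ [' ']) := by
      rw [← List.append_assoc, List.takeWhile_append_dropWhile]
    rw [hpre, hdec, pvInfix_skip _ _ _ htk]
    cases hd : l.dropWhile (· ≠ ' ') with
    | nil =>
      constructor
      · rintro (h | h)
        · rw [pvSplitSp_firstTok l, hd]; simpa using h
        · exfalso
          have := h.sublist.length_le
          simp at this
      · intro h
        rw [pvSplitSp_firstTok l, hd] at h
        simp only [List.mem_singleton] at h
        exact Or.inl h
    | cons c t =>
      have hc : c = ' ' := by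
        have := pvDropHead l c t hd
        simpa using this
      subst hc
      have htlen : t.length ≤ n := by
        have h1 : (l.dropWhile (· ≠ ' ')).length ≤ l.length := List.length_dropWhile_le _ _
        rw [hd] at h1
        simp at h1
        omega
      rw [show (' ' :: t) ++ [' '] = ' ' :: (t ++ [' ']) from rfl]
      rw [← PySem.Chars.isIn_iff_infix, ih t w htlen hw hsp]
      rw [pvSplitSp_firstTok l, hd]
      simp [List.mem_cons]

theorem pvWordsA_ok : ∀ w ∈ pvWordsA, w ≠ [] ∧ ' ' ∉ w := by decide

-- pvEngagementSet holds exactly the words of pvWordsA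
set_option maxRecDepth 40000 in
theorem pvSetA : ∀ w ∈ pvWordsA, pvEngagementSet.contains w = true := by decide

set_option maxRecDepth 40000 in
theorem pvSetB : ∀ w ∈ (pvEngagementSet : List (List Char)), w ∈ pvWordsA := by decide

-- membership of a no-space prefix distributes over the split
theorem pvSplitSp_append_noSpace (t : List Char) : ∀ (l : List Char), ' ' ∉ t →
    pvSplitSp (t ++ l) = (pvSplitSp l).modifyHead (t ++ ·) := by
  induction t with
  | nil => intro l _; cases h : pvSplitSp l <;> simp [h]
  | cons c t' ih =>
    intro l ht
    have hc : c ≠ ' ' := fun h => ht (h ▸ List.mem_cons_self)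
    have ht' : ' ' ∉ t' := fun h => ht (List.mem_cons_of_mem _ h)
    show pvSplitSp (c :: (t' ++ l)) = _
    rw [pvSplitSp, if_neg hc, ih l ht']
    cases pvSplitSp l <;> simp

theorem pvLowerChar_ne_space (c : Char) (h : c ≠ ' ') : PySem.Chars.lowerChar c ≠ ' ' := by
  unfold PySem.Chars.lowerChar
  split_ifs with hu
  · intro he
    have h2 : (Char.ofNat (c.toNat + 32)).toNat = 32 := by rw [he]; rfl
    have h3 : 65 ≤ c.toNat ∧ c.toNat ≤ 90 := by
      simpa [PySem.Chars.isupper, Char.le_def] using hu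
    have hv : Nat.isValidChar (c.toNat + 32) := Or.inl (by exact_mod_cast show c.toNat + 32 < 55296 by omega)
    have h6 : (Char.ofNat (c.toNat + 32)).toNat = c.toNat + 32 := by
      generalize c.toNat + 32 = m at hv ⊢
      simp [Char.ofNat, dif_pos hv, Char.ofNatAux, Char.toNat]
    rw [h6] at h2
    omega
  · exact h

theorem pvLowerChar_space : PySem.Chars.lowerChar ' ' = ' ' := by decide

-- the flag components of the scan
theorem pvScanB_flags : ∀ (cs tok : List Char) (hw hb hq : Bool),
    (pvScanB cs tok hw hb hq).2.1 = (hb || cs.contains '!') ∧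
    (pvScanB cs tok hw hb hq).2.2 = (hq || cs.contains '?') := by
  intro cs
  induction cs with
  | nil => intro tok hw hb hq; simp [pvScanB]
  | cons c rest ih =>
    intro tok hw hb hq
    rw [pvScanB]
    by_cases hc : (c == ' ') = true
    · rw [if_pos hc]
      obtain ⟨h1, h2⟩ := ih [] (hw || pvEngagementSet.contains tok.reverse)
        (if c == '!' then true else hb) (if c == '!' then hq else if c == '?' then true else hq)
      refine ⟨h1.trans ?_, h2.trans ?_⟩ <;>
        · have : c = ' ' := by simpa using hc
          subst this
          simp
    · rw [if_neg hc]
      obtain ⟨h1, h2⟩ := ih (PySem.Chars.lowerChar c :: tok) hw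
        (if c == '!' then true else hb) (if c == '!' then hq else if c == '?' then true else hq)
      constructor
      · rw [h1]
        by_cases hb1 : (c == '!') = true
        · have : c = '!' := by simpa using hb1
          subst this; simp
        · have : ¬ (c = '!') := by simpa using hb1
          simp [hb1, Ne.symm this]
      · rw [h2]
        by_cases hb1 : (c == '!') = true
        · have : c = '!' := by simpa using hb1
          subst this; simp
        · by_cases hq1 : (c == '?') = true
          · have : c = '?' := by simpa using hq1
            subst this; simp [hb1]
          · have h? : ¬ (c = '?') := by simpa using hq1
            simp [hb1, hq1, Ne.symm h?]

-- the word component of the scan: any token of the split of (tok.reverse ++ lower cs) hits the set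
theorem pvScanB_word : ∀ (cs tok : List Char) (hw hb hq : Bool), ' ' ∉ tok →
    (pvScanB cs tok hw hb hq).1 =
      (hw || (pvSplitSp (tok.reverse ++ PySem.Chars.lower cs)).any (fun t => pvEngagementSet.contains t)) := by
  intro cs
  induction cs with
  | nil =>
    intro tok hw hb hq htok
    have hrev : ' ' ∉ tok.reverse := by simpa using htok
    have h0 : pvSplitSp tok.reverse = [tok.reverse] := by
      have := pvSplitSp_append_noSpace tok.reverse [] hrev
      simpa [pvSplitSp] using this
    rw [pvScanB]
    simp [PySem.Chars.lower, h0]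
  | cons c rest ih =>
    intro tok hw hb hq htok
    have hrev : ' ' ∉ tok.reverse := by simpa using htok
    rw [pvScanB]
    simp only [PySem.Chars.lower, List.map_cons]
    by_cases hc : (c == ' ') = true
    · rw [if_pos hc]
      have hcs : c = ' ' := by simpa using hc
      subst hcs
      rw [ih [] _ _ _ (by simp)]
      rw [pvLowerChar_space]
      rw [show tok.reverse ++ ' ' :: List.map PySem.Chars.lowerChar rest =
            tok.reverse ++ (' ' :: List.map PySem.Chars.lowerChar rest) from rfl]
      rw [pvSplitSp_append_noSpace tok.reverse _ hrev]
      rw [show pvSplitSp (' ' :: List.map PySem.Chars.lowerChar rest) =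
            [] :: pvSplitSp (List.map PySem.Chars.lowerChar rest) from by rw [pvSplitSp]; simp]
      simp only [List.modifyHead_cons, List.append_nil, List.any_cons, List.reverse_nil,
        List.nil_append, PySem.Chars.lower]
      cases hw <;> cases pvEngagementSet.contains tok.reverse <;> simp
    · rw [if_neg hc]
      have hcs : c ≠ ' ' := by simpa using hc
      have hl : ' ' ∉ (PySem.Chars.lowerChar c :: tok) := by
        intro h
        rcases List.mem_cons.mp h with h | h
        · exact pvLowerChar_ne_space c hcs h.symm
        · exact htok h
      rw [ih _ _ _ _ hl]
      simp only [List.reverse_cons, PySem.Chars.lower, List.append_assoc, List.cons_append,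
        List.nil_append]

-- A's word search equals "some token of L is in the set", for any token list L
theorem pvAnyWords (L : List (List Char)) :
    (pvWordsA.any (fun w => decide (w ∈ L))) = (L.any (fun t => pvEngagementSet.contains t)) := by
  rw [Bool.eq_iff_iff]
  simp only [List.any_eq_true, decide_eq_true_iff]
  constructor
  · rintro ⟨w, hwA, hin⟩
    exact ⟨w, hin, pvSetA w hwA⟩
  · rintro ⟨t, htL, hcont⟩
    have : t ∈ (pvEngagementSet : List (List Char)) := by
      simpa [List.contains_iff_mem] using hcont
    exact ⟨t, pvSetB t this, htL⟩

theorem pvIsIn_singleton (a : Char) (l : List Char) : PySem.Chars.isIn [a] l = l.contains a := by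
  rw [Bool.eq_iff_iff, PySem.Chars.isIn_iff_infix, List.contains_iff_mem]
  constructor
  · intro h
    exact (List.singleton_sublist.mp h.sublist)
  · intro h
    obtain ⟨s, t, rfl⟩ := List.append_of_mem h
    exact ⟨s, t, by simp⟩

theorem pvScore (c : Nat) (b anyb : Bool) (h : anyb = decide (0 < c)) :
    decide ((if b = true then ((c : Int)) + 2 else ((c : Int))) > 0) = (anyb || b) := by
  cases b
  · simp [h]
  · simp only [Bool.or_true, if_true, gt_iff_lt, decide_eq_true_iff]
    positivity

-- ===== VERDICT (by name: the statement is the Claim_ definition above) =====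
theorem is_engaging_sentence_py_spec : Claim_equal_is_engaging_sentence_py := by
  intro sentence _
  show is_engaging_sentence_py sentence = is_engaging_sentence_py_alt sentence
  unfold is_engaging_sentence_py is_engaging_sentence_py_alt
  by_cases hg : (sentence.toList.isEmpty || decide (sentence.toList.length < 5)) = true
  · simp only [if_pos hg]
  · simp only [if_neg hg]
    set cs := sentence.toList with hcs
    set sl := PySem.Chars.lower cs with hsl
    -- A side: score > 0  =  (some word is a token)  ||  (bang / short question)
    rw [pvScore _ _
         (pvWordsA.any (fun w => PySem.Chars.isIn (' ' :: (w ++ [' '])) (' ' :: (sl ++ [' ']))))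
         (by rw [Bool.eq_iff_iff, List.any_eq_true, decide_eq_true_iff, List.countP_pos_iff])]
    have hA : (pvWordsA.any (fun w => PySem.Chars.isIn (' ' :: (w ++ [' '])) (' ' :: (sl ++ [' '])))) =
        (pvWordsA.any (fun w => decide (w ∈ pvSplitSp sl))) := by
      rw [Bool.eq_iff_iff]
      simp only [List.any_eq_true, decide_eq_true_iff]
      constructor
      · rintro ⟨w, hwA, hin⟩
        obtain ⟨hne, hsp⟩ := pvWordsA_ok w hwA
        exact ⟨w, hwA, (pvMain sl.length sl w le_rfl hne hsp).mp hin⟩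
      · rintro ⟨w, hwA, hmem⟩
        obtain ⟨hne, hsp⟩ := pvWordsA_ok w hwA
        exact ⟨w, hwA, (pvMain sl.length sl w le_rfl hne hsp).mpr hmem⟩
    rw [hA, pvAnyWords (pvSplitSp sl)]
    -- B side: unfold the scan's three components
    obtain ⟨hflag1, hflag2⟩ := pvScanB_flags cs [] false false false
    have hword := pvScanB_word cs [] false false false (by simp)
    simp only [List.reverse_nil, List.nil_append, Bool.false_or] at hflag1 hflag2 hword
    rw [hword, hflag1, hflag2, ← hsl]
    rw [pvIsIn_singleton, pvIsIn_singleton]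
    cases h1 : (pvSplitSp sl).any (fun t => pvEngagementSet.contains t) <;>
      cases h2 : cs.contains '!' <;> cases h3 : cs.contains '?' <;> simp
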